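-- pv_equiv track=rewrite | github.com/georgeprice/advent-of-code | 2016/07/day-7.py | is_aba
-- ===== SOURCE A (Python) =====
-- def is_aba(raw: str) -> [str]:
--     # recursive case - try all 3 character substrings
--     solutions = []
--     for i in range(len(raw)-2):
--         child = raw[i:i+3]
--         if len(set(child)) != 2:
--             continue
--         if child[0] == child[2] and child[0] != child[1]:
--             solutions.append("{}{}{}".format(child[1], child[0], child[1]))
--     return solutions
-- ===== SOURCE B (Python) =====
-- def is_aba(raw: str) -> [str]:
--     # Stage 1: run-length encode the string into maximal runs of equal characters.
--     # Stage 2: an ABA occurrence is exactly a length-1 run whose two neighbouring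
--     # runs carry the same character (adjacent runs always differ, so a != b for free).
--     runs = []
--     for ch in raw:
--         if runs and runs[-1][0] == ch:
--             runs[-1] = (ch, runs[-1][1] + 1)
--         else:
--             runs.append((ch, 1))
--     return [b + a + b for (a, _), (b, n), (c, _) in zip(runs, runs[1:], runs[2:])
--             if n == 1 and a == c]
-- ===== Notes on version B (the rewrite author's own statement) =====
-- stated objective: alternative
-- what changed: Replaces A's per-index 3-char slicing with set-cardinality test by a two-stage algorithm: run-length encode the string, then emit one bab per length-1 run flanked by two runs of the same character (adjacent runs always differ, so the a!=b test disappears).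
import Mathlib
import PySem

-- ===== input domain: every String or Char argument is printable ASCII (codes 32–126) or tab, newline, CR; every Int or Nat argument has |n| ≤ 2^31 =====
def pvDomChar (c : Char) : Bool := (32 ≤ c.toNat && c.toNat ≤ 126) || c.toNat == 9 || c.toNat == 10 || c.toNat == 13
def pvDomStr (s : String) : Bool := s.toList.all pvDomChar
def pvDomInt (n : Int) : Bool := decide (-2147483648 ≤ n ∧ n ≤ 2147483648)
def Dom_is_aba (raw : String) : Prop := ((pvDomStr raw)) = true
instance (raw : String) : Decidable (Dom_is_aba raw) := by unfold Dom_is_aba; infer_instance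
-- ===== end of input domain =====

-- B replaces A's per-index 3-char slicing (with a set-cardinality pre-filter) by a two-stage
-- algorithm: run-length encode the string, then emit one bab per length-1 run flanked by two
-- runs of the same character; a genuinely different traversal of the same cost.

-- ===== PORT A =====
-- for i in range(len(raw)-2): child = raw[i:i+3]; if len(set(child)) != 2: continue;
-- if child[0]==child[2] and child[0]!=child[1]: solutions.append(child[1]+child[0]+child[1]).
-- child[k] is always in range (the slice has length 3 whenever the loop runs), so pyGetD is exact here.
def is_aba (raw : String) : List String :=
  (PySem.List.pyRange 0 (PySem.Str.len raw - 2) 1).foldl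
    (fun solutions i =>
      let child := PySem.List.slice raw.toList (some i) (some (i + 3))
      if (PySem.Set.ofList child).length ≠ 2 then solutions
      else if PySem.List.pyGetD child 0 ' ' = PySem.List.pyGetD child 2 ' ' ∧
              PySem.List.pyGetD child 0 ' ' ≠ PySem.List.pyGetD child 1 ' ' then
        solutions ++ [String.ofList [PySem.List.pyGetD child 1 ' ', PySem.List.pyGetD child 0 ' ',
                                     PySem.List.pyGetD child 1 ' ']]
      else solutions)
    []

-- ===== PORT B =====
-- Stage 1 of Source B: the run-building loop (append (ch,1), or replace the last pair by (ch,n+1))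
def rleStep (runs : List (Char × Int)) (ch : Char) : List (Char × Int) :=
  match runs.getLast? with
  | some (c, n) => if c = ch then runs.dropLast ++ [(ch, n + 1)] else runs ++ [(ch, 1)]
  | none => runs ++ [(ch, 1)]

-- Stage 2 of Source B: the zip-triples comprehension over consecutive runs, as structural recursion
def rleScan : List (Char × Int) → List String
  | (a, _) :: (b, n) :: (c, k) :: rest =>
      (if n = 1 ∧ a = c then [String.ofList [b, a, b]] else []) ++ rleScan ((b, n) :: (c, k) :: rest)
  | _ => []

def is_aba_alt (raw : String) : List String :=
  rleScan (raw.toList.foldl rleStep [])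

-- ===== PRECONDITION & SPEC =====
def Spec_is_aba (raw : String) (out : List String) : Prop := out = is_aba_alt raw
instance (raw : String) (out : List String) : Decidable (Spec_is_aba raw out) := by unfold Spec_is_aba; infer_instance

-- ===== CLAIM (what is proved, stated in full; the proofs are below) =====
def Claim_equal_is_aba : Prop := ∀ (raw : String), Dom_is_aba raw → Spec_is_aba raw (is_aba raw)

-- ===== LEMMAS AND PROOFS =====

-- intermediate characterisation used only by the proofs: the sliding-window result
def abaWindows : List Char → List String
  | a :: b :: c :: rest =>
      if a = c ∧ a ≠ b then String.ofList [b, a, b] :: abaWindows (b :: c :: rest)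
      else abaWindows (b :: c :: rest)
  | _ => []

-- A's loop body, as a named function of the underlying char list (identical to the lambda in is_aba)
def abaBody (l : List Char) (solutions : List String) (i : Int) : List String :=
  let child := PySem.List.slice l (some i) (some (i + 3))
  if (PySem.Set.ofList child).length ≠ 2 then solutions
  else if PySem.List.pyGetD child 0 ' ' = PySem.List.pyGetD child 2 ' ' ∧
          PySem.List.pyGetD child 0 ' ' ≠ PySem.List.pyGetD child 1 ' ' then
    solutions ++ [String.ofList [PySem.List.pyGetD child 1 ' ', PySem.List.pyGetD child 0 ' ',
                                 PySem.List.pyGetD child 1 ' ']]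
  else solutions

-- shifting the window index by one is the same as dropping the head of the list
theorem abaBody_shift (l : List Char) (s : List String) (i : Nat) :
    abaBody l s ((i:Int)+1) = abaBody l.tail s (i:Int) := by
  have h1 : PySem.List.slice l (some ((i:Int)+1)) (some ((i:Int)+1+3))
      = PySem.List.slice l.tail (some (i:Int)) (some ((i:Int)+3)) := by
    have h2 : PySem.List.slice l (some ((i:Int)+1)) (some ((i:Int)+1+3))
        = PySem.List.slice l (some ((i+1:Nat):Int)) (some (((i+4:Nat)):Int)) := by norm_cast
    have h3 : PySem.List.slice l.tail (some (i:Int)) (some ((i:Int)+3))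
        = PySem.List.slice l.tail (some ((i:Nat):Int)) (some (((i+3:Nat)):Int)) := by norm_cast
    rw [h2, h3, PySem.List.slice_natCast, PySem.List.slice_natCast]
    cases l <;> simp
  unfold abaBody
  rw [h1]

-- the first iteration: the combined set-cardinality + pattern test collapses to a = c ∧ a ≠ b
theorem abaBody_zero (a b c : Char) (rest : List Char) (s : List String) :
    abaBody (a::b::c::rest) s 0 =
      if a = c ∧ a ≠ b then s ++ [String.ofList [b, a, b]] else s := by
  have hch : PySem.List.slice (a::b::c::rest) (some 0) (some (0+3)) = [a,b,c] := by
    simp [PySem.List.slice_to]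
  unfold abaBody
  rw [hch]
  by_cases h : a = c ∧ a ≠ b
  · obtain ⟨hc, hb⟩ := h
    subst hc
    simp [PySem.Set.ofList, PySem.Set.add, PySem.Set.empty, hb, Ne.symm hb,
          PySem.List.pyGetD, PySem.List.pyGet?, PySem.List.pyIdx?]
  · have h' : ¬ (PySem.List.pyGetD [a,b,c] 0 ' ' = PySem.List.pyGetD [a,b,c] 2 ' ' ∧
                 PySem.List.pyGetD [a,b,c] 0 ' ' ≠ PySem.List.pyGetD [a,b,c] 1 ' ') := by
      simpa [PySem.List.pyGetD, PySem.List.pyGet?, PySem.List.pyIdx?] using h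
    dsimp only
    rw [if_neg h]
    split_ifs <;> rfl

-- folding A's body over indices 1 .. n-3 of x::t equals folding it over 0 .. n-4 of t
theorem abaFold_shift (x : Char) (t : List Char) (s0 : List String) :
    (PySem.List.pyRange 1 (((x::t).length : Int) - 2) 1).foldl (abaBody (x::t)) s0
      = (PySem.List.pyRange 0 ((t.length : Int) - 2) 1).foldl (abaBody t) s0 := by
  rw [PySem.List.pyRange_one, PySem.List.pyRange_one]
  have hn : ((((x::t).length : Int) - 2) - 1).toNat = (((t.length : Int) - 2) - 0).toNat := by
    simp; omega
  rw [hn, List.foldl_map, List.foldl_map]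
  have hfun : (fun (s : List String) (k : Nat) => abaBody (x::t) s (1 + (k:Int)))
      = fun (s : List String) (k : Nat) => abaBody t s (0 + (k:Int)) := by
    funext s k
    have h : (1:Int) + (k:Int) = (k:Int) + 1 := by ring
    rw [h, abaBody_shift]
    simp
  rw [hfun]

-- invariant for A: A's whole loop appends exactly the sliding-window result
theorem abaFold_eq (l : List Char) (acc : List String) :
    (PySem.List.pyRange 0 ((l.length : Int) - 2) 1).foldl (abaBody l) acc
      = acc ++ abaWindows l := by
  induction l generalizing acc with
  | nil => rw [PySem.List.pyRange_one_eq_nil (by simp)]; simp [abaWindows]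
  | cons a t ih =>
    match t with
    | [] => rw [PySem.List.pyRange_one_eq_nil (by simp)]; simp [abaWindows]
    | [b] => rw [PySem.List.pyRange_one_eq_nil (by simp)]; simp [abaWindows]
    | b :: c :: rest =>
      rw [PySem.List.pyRange_one_cons (by simp; omega)]
      simp only [List.foldl_cons]
      have h01 : (0:Int) + 1 = 1 := by norm_num
      rw [abaBody_zero, h01, abaFold_shift, ih]
      conv_rhs => rw [abaWindows]
      split_ifs <;> simp

-- ---- B side ----

-- recursive form of stage 1 (what the foldl with last-element update computes)
def rleAuxI : Char → Int → List Char → List (Char × Int)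
  | c, n, [] => [(c, n)]
  | c, n, d :: rest => if c = d then rleAuxI c (n + 1) rest else (c, n) :: rleAuxI d 1 rest

theorem rleAuxI_head (c : Char) (n : Int) (l : List Char) :
    ∃ k t, rleAuxI c n l = (c, k) :: t := by
  induction l generalizing n with
  | nil => exact ⟨n, [], rfl⟩
  | cons d rest ih =>
    by_cases h : c = d
    · obtain ⟨k, t, ht⟩ := ih (n + 1)
      exact ⟨k, t, by subst h; rw [rleAuxI, if_pos rfl, ht]⟩
    · exact ⟨n, rleAuxI d 1 rest, by simp [rleAuxI, h]⟩

-- the foldl of Source B's run-building loop is rleAuxI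
theorem foldl_rleStep (l : List Char) (pre : List (Char × Int)) (c : Char) (n : Int) :
    List.foldl rleStep (pre ++ [(c, n)]) l = pre ++ rleAuxI c n l := by
  induction l generalizing pre c n with
  | nil => simp [rleAuxI]
  | cons d t ih =>
    simp only [List.foldl_cons]
    have hstep : rleStep (pre ++ [(c, n)]) d =
        if c = d then pre ++ [(d, n + 1)] else (pre ++ [(c, n)]) ++ [(d, 1)] := by
      unfold rleStep
      rw [List.getLast?_concat]
      simp
    by_cases h : c = d
    · subst h
      rw [hstep, if_pos rfl, ih]
      simp [rleAuxI]
    · rw [hstep, if_neg h, ih]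
      simp [rleAuxI, h]

-- dropping a duplicated head character does not change the window result
theorem abaWindows_dup (b : Char) (z : List Char) :
    abaWindows (b :: b :: z) = abaWindows (b :: z) := by
  match z with
  | [] => rfl
  | y :: t =>
    have hcond : ¬ (b = y ∧ b ≠ b) := by simp
    conv_lhs => rw [abaWindows]
    rw [if_neg hcond]

-- main invariant: scanning runs after a run of character a (a ≠ b, left-run count n irrelevant)
theorem rleScan_aux (rest : List Char) (a b : Char) (m n : Int) (hm : 1 ≤ m) (hab : a ≠ b) :
    rleScan ((a, n) :: rleAuxI b m rest)
      = if m = 1 then abaWindows (a :: b :: rest) else abaWindows (b :: rest) := by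
  induction rest generalizing a b m n with
  | nil =>
    simp only [rleAuxI, rleScan]
    split_ifs <;> rfl
  | cons d rest' ih =>
    by_cases h : b = d
    · subst h
      rw [rleAuxI, if_pos rfl]
      have h2 : ¬ (m + 1 = 1) := by omega
      rw [ih a b (m + 1) n (by omega) hab, if_neg h2]
      have hcond : ¬ (a = b ∧ a ≠ b) := fun ⟨x, y⟩ => y x
      split_ifs with h1
      · conv_rhs => rw [abaWindows]
        rw [if_neg hcond, abaWindows_dup]
      · rw [abaWindows_dup]
    · rw [rleAuxI, if_neg h]
      obtain ⟨k, t, ht⟩ := rleAuxI_head d 1 rest'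
      have hrec := ih b d 1 m (le_refl 1) h
      rw [if_pos rfl] at hrec
      rw [ht] at hrec
      rw [ht, rleScan, hrec]
      split_ifs with h1 h2
      · conv_rhs => rw [abaWindows]
        rw [if_pos ⟨h1.2, hab⟩]
        simp
      · exact absurd h1.1 h2
      · conv_rhs => rw [abaWindows]
        have : ¬ (a = d ∧ a ≠ b) := fun ⟨x, _⟩ => h1 ⟨‹m = 1›, x⟩
        rw [if_neg this]
        simp
      · simp

-- top-level stage-1 invariant
theorem rleScan_top (rest : List Char) (c : Char) (m : Int) :
    rleScan (rleAuxI c m rest) = abaWindows (c :: rest) := by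
  induction rest generalizing c m with
  | nil => rfl
  | cons d rest' ih =>
    by_cases h : c = d
    · subst h
      rw [rleAuxI, if_pos rfl, ih, abaWindows_dup]
    · rw [rleAuxI, if_neg h, rleScan_aux rest' c d 1 m (le_refl 1) h, if_pos rfl]

-- B equals the sliding-window characterisation
theorem alt_eq_windows (l : List Char) :
    rleScan (List.foldl rleStep [] l) = abaWindows l := by
  match l with
  | [] => rfl
  | c :: t =>
    have h0 : rleStep [] c = [(c, 1)] := rfl
    rw [List.foldl_cons, h0]
    have := foldl_rleStep t [] c 1
    simp only [List.nil_append] at this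
    rw [this, rleScan_top]

-- ===== VERDICT (by name: the statement is the Claim_ definition above) =====
theorem is_aba_spec : Claim_equal_is_aba := by
  intro raw _
  show is_aba raw = is_aba_alt raw
  have hb : is_aba raw
      = (PySem.List.pyRange 0 (PySem.Str.len raw - 2) 1).foldl (abaBody raw.toList) [] := rfl
  have hlen : PySem.Str.len raw = ((raw.toList.length : Int)) := by
    simp [PySem.Str.len_eq, String.length_toList]
  rw [hb, hlen, abaFold_eq]
  simp only [List.nil_append]
  rw [is_aba_alt, alt_eq_windows]
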